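-- pv_equiv track=rewrite | github.com/hwan1111/Coding-Test | 프로그래머스/unrated/181851. 전국 대회 선발 고사/전국 대회 선발 고사.py | solution
-- ===== SOURCE A (Python) =====
-- def solution(rank, attendance):
--     answer = 0
--     tmp = []
--     for i, v in enumerate(rank):
--         if attendance[i]:
--             tmp.append(rank[i])
--
--     tmp.sort()
--     a, b, c = 0, 0, 0
--     for i, v in enumerate(rank):
--         if v == tmp[0]:
--             a = i
--         elif v == tmp[1]:
--             b = i
--         elif v == tmp[2]:
--             c = i
--
--     return 10000 * a + 100 * b + c
-- ===== SOURCE B (Python) =====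
-- def _insert(best, r, i):
--     # insert (r, i) into the ascending-by-value list best
--     if not best or r < best[0][0]:
--         return [(r, i)] + best
--     return [best[0]] + _insert(best[1:], r, i)
--
--
-- def solution(rank, attendance):
--     # single pass: keep only the three best (smallest-rank) attending students
--     best = []
--     for i, r in enumerate(rank):
--         if attendance[i]:
--             best = _insert(best, r, i)[:3]
--     return sum(w * i for w, (_, i) in zip((10000, 100, 1), best))
-- ===== Notes on version B (the rewrite author's own statement) =====
-- stated objective: alternative
-- what changed: B replaces A's collect-all/sort/value-matching elif rescan by a single pass that keeps only the three best (value, index) pairs via bounded insertion and sums them against the weights 10000/100/1; …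
-- outside the precondition, e.g. on solution([1, 1, 2, 3], [True, True, True, True]): A returns 10002, B returns 102; on solution([1, 2, 1], [True, True, True]): A returns 20001, B returns 201
import Mathlib
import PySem

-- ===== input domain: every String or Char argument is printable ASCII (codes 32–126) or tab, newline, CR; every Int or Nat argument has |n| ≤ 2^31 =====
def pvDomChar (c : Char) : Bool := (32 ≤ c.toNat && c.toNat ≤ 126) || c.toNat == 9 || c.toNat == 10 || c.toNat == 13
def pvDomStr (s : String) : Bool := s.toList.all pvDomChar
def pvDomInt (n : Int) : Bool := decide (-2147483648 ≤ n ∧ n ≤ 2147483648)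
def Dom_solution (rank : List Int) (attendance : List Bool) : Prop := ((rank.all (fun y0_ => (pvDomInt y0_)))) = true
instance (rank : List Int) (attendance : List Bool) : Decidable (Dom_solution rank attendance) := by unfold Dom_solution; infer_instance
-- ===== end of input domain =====

-- B replaces A's collect/sort/elif-rescan by a single pass keeping only the three best
-- (value, index) pairs via bounded insertion; alternative structure, same results on Pre_.


-- ===== PORT A =====
-- literal transliteration of A; attendance[i], rank[i], tmp[j] via pyGet? (in range on Pre_)
def solution (rank : List Int) (attendance : List Bool) : Int :=
  let tmp : List Int := (PySem.List.enumerate rank).foldl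
    (fun acc iv =>
      if (PySem.List.pyGet? attendance iv.1).getD false = true
      then acc ++ [(PySem.List.pyGet? rank iv.1).getD 0] else acc) []
  let tmps := PySem.List.sorted tmp (fun x => x) false
  let abc : Int × Int × Int := (PySem.List.enumerate rank).foldl
    (fun s iv =>
      if iv.2 = (PySem.List.pyGet? tmps 0).getD 0 then (iv.1, s.2.1, s.2.2)
      else if iv.2 = (PySem.List.pyGet? tmps 1).getD 0 then (s.1, iv.1, s.2.2)
      else if iv.2 = (PySem.List.pyGet? tmps 2).getD 0 then (s.1, s.2.1, iv.1)
      else s) ((0 : Int), (0 : Int), (0 : Int))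
  10000 * abc.1 + 100 * abc.2.1 + abc.2.2

-- ===== PORT B =====
-- Source B's _insert: put (r, i) into the ascending-by-value list best
def insTop (best : List (Int × Int)) (r i : Int) : List (Int × Int) :=
  match best with
  | [] => [(r, i)]
  | p :: t => if r < p.1 then (r, i) :: p :: t else p :: insTop t r i

-- literal transliteration of Source B: one pass keeping the three best pairs (best[:3] via slice),
-- then the weighted sum over zip((10000, 100, 1), best)
def solution_alt (rank : List Int) (attendance : List Bool) : Int :=
  let best := (PySem.List.enumerate rank).foldl
    (fun b iv =>
      if (PySem.List.pyGet? attendance iv.1).getD false = true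
      then PySem.List.slice (insTop b iv.2 iv.1) none (some 3) else b) []
  ((List.zip [(10000 : Int), 100, 1] best).map (fun wp => wp.1 * wp.2.2)).sum

-- ===== PRECONDITION & SPEC =====
-- Pre_ excludes (a) inputs where A raises IndexError: attendance shorter than rank, or a rank
-- value outside fewer-than-three attended values (the second loop then reaches tmp[1]/tmp[2]);
-- and (b) tie inputs that the original problem (ranks are a permutation of 1..n) never
-- produces: one of the three best attended values occurs twice among attendees or occurs again
-- after its attended position, so "the index of the k-th best student" is ambiguous — A
-- resolves the tie by value matching (last occurrence anywhere, later equal slots skipped),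
-- B by reporting the first attending holder of the value; either reading is defensible.
def Pre_solution (rank : List Int) (attendance : List Bool) : Prop :=
  rank.length ≤ attendance.length ∧
  (3 ≤ ((List.range rank.length).filter (fun k => attendance.getD k false)).length ∨
    ∀ v ∈ rank, v ∈ ((List.range rank.length).filter
      (fun k => attendance.getD k false)).map (fun k => rank.getD k 0)) ∧
  (∀ t ∈ (PySem.List.sorted (((List.range rank.length).filter
        (fun k => attendance.getD k false)).map (fun k => rank.getD k 0))
        (fun x => x) false).take 3,
    ∃ j ∈ List.range rank.length, rank.getD j 0 = t ∧ attendance.getD j false = true ∧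
      (∀ k ∈ List.range rank.length, j < k → rank.getD k 0 ≠ t) ∧
      (∀ k ∈ List.range j, rank.getD k 0 = t → attendance.getD k false = false))

instance (rank : List Int) (attendance : List Bool) : Decidable (Pre_solution rank attendance) := by
  unfold Pre_solution; infer_instance

def pvWitness_solution : List Int × List Bool := ([3, 1, 2], [true, true, true])

def Spec_solution (rank : List Int) (attendance : List Bool) (out : Int) : Prop := out = solution_alt rank attendance
instance (rank : List Int) (attendance : List Bool) (out : Int) : Decidable (Spec_solution rank attendance out) := by unfold Spec_solution; infer_instance

-- ===== CLAIM (what is proved, stated in full; the proofs are below) =====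
def Claim_equal_solution : Prop := ∀ (rank : List Int) (attendance : List Bool), Dom_solution rank attendance → Pre_solution rank attendance → Spec_solution rank attendance (solution rank attendance)

-- ===== LEMMAS AND PROOFS =====

-- a last-match scan leaves its accumulator alone when nothing matches
theorem lastScan_none {α : Type} (P : Int × α → Prop) [DecidablePred P]
    (l : List (Int × α)) (init : Int) (h : ∀ p ∈ l, ¬ P p) :
    l.foldl (fun a p => if P p then p.1 else a) init = init := by
  induction l generalizing init with
  | nil => rfl
  | cons x t ih =>
    simp only [List.foldl_cons]
    rw [if_neg (h x (by simp))]
    exact ih init (fun p hp => h p (by simp [hp]))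

-- A's elif fold over (index, value) pairs splits into three independent last-match scans
theorem fold3_decomp (l : List (Int × Int)) (t0 t1 t2 : Int) (s : Int × Int × Int) :
    l.foldl (fun s iv =>
      if iv.2 = t0 then (iv.1, s.2.1, s.2.2)
      else if iv.2 = t1 then (s.1, iv.1, s.2.2)
      else if iv.2 = t2 then (s.1, s.2.1, iv.1)
      else s) s
    = (l.foldl (fun a p => if p.2 = t0 then p.1 else a) s.1,
       l.foldl (fun b p => if (¬ p.2 = t0) ∧ p.2 = t1 then p.1 else b) s.2.1,
       l.foldl (fun c p => if (¬ p.2 = t0) ∧ (¬ p.2 = t1) ∧ p.2 = t2 then p.1 else c) s.2.2) := by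
  induction l generalizing s with
  | nil => rfl
  | cons x t ih =>
    simp only [List.foldl_cons]
    rw [ih]
    by_cases h0 : x.2 = t0 <;> by_cases h1 : x.2 = t1 <;> by_cases h2 : x.2 = t2 <;>
      simp [h0, h1, h2] <;> split_ifs <;> simp_all

theorem scanB_simp (l : List (Int × Int)) (t0 t1 : Int) (h : t1 ≠ t0) (b : Int) :
    l.foldl (fun b p => if (¬ p.2 = t0) ∧ p.2 = t1 then p.1 else b) b
    = l.foldl (fun b p => if p.2 = t1 then p.1 else b) b := by
  have hfun : (fun (b : Int) (p : Int × Int) => if (¬ p.2 = t0) ∧ p.2 = t1 then p.1 else b)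
      = fun b p => if p.2 = t1 then p.1 else b := by
    funext b p
    by_cases hp : p.2 = t1
    · rw [if_pos ⟨by rw [hp]; exact h, hp⟩, if_pos hp]
    · rw [if_neg (fun hh => hp hh.2), if_neg hp]
  rw [hfun]

theorem scanC_simp (l : List (Int × Int)) (t0 t1 t2 : Int) (h0 : t2 ≠ t0) (h1 : t2 ≠ t1) (c : Int) :
    l.foldl (fun c p => if (¬ p.2 = t0) ∧ (¬ p.2 = t1) ∧ p.2 = t2 then p.1 else c) c
    = l.foldl (fun c p => if p.2 = t2 then p.1 else c) c := by
  have hfun : (fun (c : Int) (p : Int × Int) =>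
        if (¬ p.2 = t0) ∧ (¬ p.2 = t1) ∧ p.2 = t2 then p.1 else c)
      = fun c p => if p.2 = t2 then p.1 else c := by
    funext c p
    by_cases hp : p.2 = t2
    · rw [if_pos ⟨by rw [hp]; exact h0, by rw [hp]; exact h1, hp⟩, if_pos hp]
    · rw [if_neg (fun hh => hp hh.2.2), if_neg hp]
  rw [hfun]

-- insTop is insertBy on the value component
theorem insTop_eq_insertBy (b : List (Int × Int)) (r i : Int) :
    insTop b r i = PySem.List.insertBy (fun a b => decide (a.1 < b.1)) (r, i) b := by
  induction b with
  | nil => rfl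
  | cons p t ih =>
    simp only [insTop, PySem.List.insertBy]
    by_cases h : r < p.1 <;> simp [h, ih]

-- truncating before inserting does not change the truncated result
theorem take_insTop (b : List (Int × Int)) (k : Nat) (r i : Int) :
    (insTop (b.take k) r i).take k = (insTop b r i).take k := by
  induction b generalizing k with
  | nil => simp [insTop]
  | cons p t ih =>
    cases k with
    | zero => simp
    | succ m =>
      simp only [List.take_succ_cons, insTop]
      by_cases h : r < p.1
      · simp only [if_pos h, List.take_succ_cons]
        cases m with
        | zero => simp
        | succ m' =>
          simp only [List.take_succ_cons, List.take_take]
          rw [Nat.min_eq_left (Nat.le_succ m')]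
      · simp only [if_neg h, List.take_succ_cons, ih]

-- the truncated fold computes the truncation of the full insertion sort
theorem foldl_insTop_take (l : List (Int × Int)) (b : List (Int × Int)) :
    l.foldl (fun acc p => (insTop acc p.1 p.2).take 3) (b.take 3)
    = (l.foldl (fun acc p => insTop acc p.1 p.2) b).take 3 := by
  induction l generalizing b with
  | nil => rfl
  | cons x t ih =>
    simp only [List.foldl_cons]
    rw [take_insTop, ← ih]


-- attended values through Int indices = attended values through Nat indices (Pre_'s vocabulary)
theorem attended_vals_eq (rank : List Int) (attendance : List Bool) :
    ((PySem.List.pyRange 0 (PySem.List.len rank)).filter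
        (fun j => (PySem.List.pyGet? attendance j).getD false)).map
      (fun j => PySem.List.pyGetD rank j 0)
    = ((List.range rank.length).filter (fun k => attendance.getD k false)).map
        (fun k => rank.getD k 0) := by
  rw [PySem.List.pyRange_one, List.filter_map]
  simp only [PySem.List.len, zero_add, Int.sub_zero, Int.toNat_natCast, List.map_map]
  have hfil : List.filter ((fun j => (PySem.List.pyGet? attendance j).getD false) ∘
        fun k : Nat => (↑k : Int)) (List.range rank.length)
      = List.filter (fun k => attendance.getD k false) (List.range rank.length) :=
    List.filter_congr (fun k hk => by
      simp [Function.comp, PySem.List.pyGet?_natCast, List.getD_eq_getElem?_getD])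
  rw [hfil]
  exact List.map_congr_left (fun k hk => by
    simp [Function.comp, PySem.List.pyGetD, PySem.List.pyGet?_natCast,
      List.getD_eq_getElem?_getD])



-- the last-match scan over enumerate(rank) returns the last index holding the value
theorem lastScan_last (rank : List Int) (j : Nat) (v : Int) (hj : j < rank.length)
    (hv : rank[j] = v)
    (hafter : ∀ k, j < k → (hk : k < rank.length) → rank[k] ≠ v) (init : Int) :
    (PySem.List.enumerate rank).foldl (fun a p => if p.2 = v then p.1 else a) init
      = (j : Int) := by
  conv_lhs => rw [show rank = rank.take (j+1) ++ rank.drop (j+1) from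
    (List.take_append_drop _ _).symm]
  rw [PySem.List.enumerate_append, List.foldl_append]
  have hnomatch : ∀ p ∈ PySem.List.enumerate (rank.drop (j+1))
      (0 + (rank.take (j+1)).length), ¬ p.2 = v := by
    intro p hp
    obtain ⟨k, hk, hpe⟩ := (PySem.List.mem_enumerate_iff _ _ _).1 hp
    rw [hpe]
    have hdk : (rank.drop (j+1))[k] = rank[j+1+k]'(by
        rw [List.length_drop] at hk
        omega) := by
      rw [List.getElem_drop]
    rw [hdk]
    exact hafter (j+1+k) (by omega) (by rw [List.length_drop] at hk; omega)
  rw [lastScan_none (fun p => p.2 = v) _ _ hnomatch]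
  have htake : rank.take (j+1) = rank.take j ++ [rank[j]] := by
    rw [List.take_add_one, List.getElem?_eq_getElem hj]
    rfl
  rw [htake, PySem.List.enumerate_append, List.foldl_append]
  have hlen2 : (rank.take j).length = j := by
    rw [List.length_take]
    omega
  simp [PySem.List.enumerate_cons, PySem.List.enumerate_nil, hlen2, hv]

-- membership in the annotated attended pair list gives the index's facts
theorem mem_m_props (rank : List Int) (attendance : List Bool) (v i : Int)
    (hmem : (v, i) ∈ ((PySem.List.pyRange 0 (PySem.List.len rank)).filter
        (fun j => (PySem.List.pyGet? attendance j).getD false)).map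
      (fun j => (PySem.List.pyGetD rank j 0, j))) :
    0 ≤ i ∧ i.toNat < rank.length ∧ attendance.getD i.toNat false = true ∧
      rank.getD i.toNat 0 = v := by
  obtain ⟨j, hj, hje⟩ := List.mem_map.1 hmem
  rw [Prod.mk.injEq] at hje
  obtain ⟨hv, hi⟩ := hje
  subst hi
  obtain ⟨hjr, hjp⟩ := List.mem_filter.1 hj
  have hrange := PySem.List.mem_pyRange_one.1 hjr
  have hlen : PySem.List.len rank = (rank.length : Int) := by
    simp [PySem.List.len]
  rw [hlen] at hrange
  refine ⟨hrange.1, by omega, ?_, ?_⟩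
  · have hcast : j = ((j.toNat : Nat) : Int) := by omega
    rw [hcast, PySem.List.pyGet?_natCast] at hjp
    rw [List.getD_eq_getElem?_getD]
    exact hjp
  · rw [← hv, PySem.List.pyGetD_of_nonneg rank 0 hrange.1]


theorem snd_mem_of_mem_enumerate (rank : List Int) (p : Int × Int)
    (hp : p ∈ PySem.List.enumerate rank 0) : p.2 ∈ rank := by
  have hmap := PySem.List.map_snd_enumerate rank 0
  rw [← hmap]
  exact List.mem_map_of_mem hp

theorem main (rank : List Int) (attendance : List Bool)
    (hcov : 3 ≤ ((List.range rank.length).filter (fun k => attendance.getD k false)).length ∨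
      ∀ v ∈ rank, v ∈ ((List.range rank.length).filter
        (fun k => attendance.getD k false)).map (fun k => rank.getD k 0))
    (hC : ∀ t ∈ (PySem.List.sorted (((List.range rank.length).filter
          (fun k => attendance.getD k false)).map (fun k => rank.getD k 0))
          (fun x => x) false).take 3,
      ∃ j ∈ List.range rank.length, rank.getD j 0 = t ∧ attendance.getD j false = true ∧
        (∀ k ∈ List.range rank.length, j < k → rank.getD k 0 ≠ t) ∧
        (∀ k ∈ List.range j, rank.getD k 0 = t → attendance.getD k false = false)) :
    solution rank attendance = solution_alt rank attendance := by
  simp only [solution, solution_alt]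
  -- Step 1: A's first loop is the attended-values list
  have htmp : (PySem.List.enumerate rank).foldl
      (fun acc iv => if (PySem.List.pyGet? attendance iv.1).getD false = true
        then acc ++ [(PySem.List.pyGet? rank iv.1).getD 0] else acc) []
    = ((PySem.List.pyRange 0 (PySem.List.len rank)).filter
        (fun j => (PySem.List.pyGet? attendance j).getD false)).map
        (fun j => PySem.List.pyGetD rank j 0) := by
    rw [PySem.List.enumerate_eq_map_pyRange rank 0, List.foldl_map]
    exact PySem.List.foldl_append_if
      (fun j => (PySem.List.pyGet? attendance j).getD false)
      (fun j => PySem.List.pyGetD rank j 0) _ []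
  -- Step 2: B's loop is the truncated insertion sort of the annotated attended pairs
  have hbest : (PySem.List.enumerate rank).foldl
      (fun b iv => if (PySem.List.pyGet? attendance iv.1).getD false = true
        then PySem.List.slice (insTop b iv.2 iv.1) none (some 3) else b) []
    = (PySem.List.sorted
        (((PySem.List.pyRange 0 (PySem.List.len rank)).filter
            (fun j => (PySem.List.pyGet? attendance j).getD false)).map
          (fun j => (PySem.List.pyGetD rank j 0, j)))
        (fun q => q.1) false).take 3 := by
    rw [PySem.List.enumerate_eq_map_pyRange rank 0, List.foldl_map]
    have hslice : ∀ (b : List (Int × Int)) (r i : Int),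
        PySem.List.slice (insTop b r i) none (some 3) = (insTop b r i).take 3 :=
      fun b r i => PySem.List.slice_to _ (by norm_num)
    simp only [hslice]
    rw [PySem.List.foldl_if_eq_foldl_filter
      (fun j => (PySem.List.pyGet? attendance j).getD false)
      (fun b j => (insTop b (PySem.List.pyGetD rank j 0) j).take 3)]
    rw [← List.foldl_map (f := fun j => (PySem.List.pyGetD rank j 0, j))
      (g := fun b (q : Int × Int) => (insTop b q.1 q.2).take 3)]
    conv_lhs => rw [show (([] : List (Int × Int))) = (([] : List (Int × Int)).take 3) from rfl]
    rw [foldl_insTop_take _ []]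
    have hins : (fun (acc : List (Int × Int)) (q : Int × Int) => insTop acc q.1 q.2)
        = fun acc q => PySem.List.insertBy (fun a b => decide (a.1 < b.1)) q acc := by
      funext acc q
      rw [insTop_eq_insertBy]
    rw [hins, ← PySem.List.sorted_eq_foldl_insertBy _ (fun q : Int × Int => q.1)]
  rw [htmp, hbest]
  set R := (PySem.List.pyRange 0 (PySem.List.len rank)).filter
      (fun j => (PySem.List.pyGet? attendance j).getD false) with hR
  set m := R.map (fun j => (PySem.List.pyGetD rank j 0, j)) with hm
  set tmp := R.map (fun j => PySem.List.pyGetD rank j 0) with htmpd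
  have htmpm : tmp = m.map (fun q => q.1) := by
    rw [hm, htmpd, List.map_map]
    rfl
  have hbridge : tmp = ((List.range rank.length).filter
      (fun k => attendance.getD k false)).map (fun k => rank.getD k 0) := by
    rw [htmpd, hR]
    exact attended_vals_eq rank attendance
  rw [← hbridge] at hC hcov
  set sm := PySem.List.sorted m (fun q => q.1) false with hsm
  have hperm : sm.Perm m := by
    rw [hsm]
    exact PySem.List.sorted_perm m (fun q => q.1) false
  have hpairle : sm.Pairwise (fun a b => a.1 ≤ b.1) := by
    rw [hsm]
    exact PySem.List.sorted_pairwise m (fun q => q.1)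
  have hlensm : sm.length = m.length := by
    rw [hsm]
    exact PySem.List.length_sorted m (fun q => q.1) false
  have hsorttmp : PySem.List.sorted tmp (fun x => x) false = sm.map (fun q => q.1) := by
    apply PySem.List.sorted_id_eq_of_perm_of_pairwise
    · rw [htmpm]
      exact hperm.map _
    · exact List.pairwise_map.mpr hpairle
  rw [hsorttmp] at hC ⊢
  -- indices inside m are pairwise distinct
  have hndR : R.Nodup := by
    rw [hR]
    exact List.Nodup.filter _ (PySem.List.nodup_pyRange_one 0 (PySem.List.len rank))
  have hndm2 : (m.map (fun q => q.2)).Nodup := by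
    rw [hm, List.map_map]
    have hcomp : ((fun q : Int × Int => q.2) ∘ fun j : Int => (PySem.List.pyGetD rank j 0, j))
        = fun j : Int => j := rfl
    rw [hcomp, List.map_id']
    exact hndR
  have hndsm2 : (sm.map (fun q => q.2)).Nodup := ((hperm.map _).nodup_iff).2 hndm2
  -- every annotated pair's index is the hC-witness index of its value
  have hslot : ∀ t i, (t, i) ∈ m →
      ∀ j, j ∈ List.range rank.length → rank.getD j 0 = t → attendance.getD j false = true →
      (∀ k ∈ List.range rank.length, j < k → rank.getD k 0 ≠ t) →
      (∀ k ∈ List.range j, rank.getD k 0 = t → attendance.getD k false = false) →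
      i = (j : Int) := by
    intro t i hmi j hjr hjv hja hafter hbefore
    obtain ⟨hi0, hilen, hiatt, hival⟩ := mem_m_props rank attendance t i (by
      rw [hm, hR] at hmi
      exact hmi)
    rcases lt_trichotomy i.toNat j with h | h | h
    · rw [hbefore i.toNat (List.mem_range.2 h) hival] at hiatt
      cases hiatt
    · omega
    · exact absurd hival (hafter i.toNat (List.mem_range.2 hilen) h)
  -- A's last-match scan hits the hC-witness index
  have hscan : ∀ t (j : Nat) (init : Int), j ∈ List.range rank.length → rank.getD j 0 = t →
      (∀ k ∈ List.range rank.length, j < k → rank.getD k 0 ≠ t) →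
      (PySem.List.enumerate rank).foldl (fun a p => if p.2 = t then p.1 else a) init
        = (j : Int) := by
    intro t j init hjr hjv hafter
    have hjn : j < rank.length := List.mem_range.1 hjr
    refine lastScan_last rank j t hjn ?_ ?_ init
    · rw [← List.getD_eq_getElem rank 0 hjn]
      exact hjv
    · intro k hk hkn
      rw [← List.getD_eq_getElem rank 0 hkn]
      exact hafter k (List.mem_range.2 hkn) hk
  have hlentmp : tmp.length = ((List.range rank.length).filter
      (fun k => attendance.getD k false)).length := by
    rw [hbridge, List.length_map]
  clear_value sm
  clear hsm
  rcases sm with _ | ⟨⟨v0, i0⟩, _ | ⟨⟨v1, i1⟩, _ | ⟨⟨v2, i2⟩, rest⟩⟩⟩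
  · -- no attendee inside Pre_: rank is empty
    have htmp0 : tmp = [] := by
      rw [htmpm]
      rw [List.length_nil] at hlensm
      rw [(List.length_eq_zero_iff).1 hlensm.symm]
      rfl
    have hrank : rank = [] := by
      rcases hcov with h | h
      · rw [← hlentmp, htmp0] at h
        simp at h
      · cases rank with
        | nil => rfl
        | cons x xs =>
          have := h x (by simp)
          rw [htmp0] at this
          cases this
    subst hrank
    rfl
  · -- exactly one attended pair
    have hmemtr : ∀ v, v ∈ tmp → v = v0 := by
      intro v hv
      rw [htmpm] at hv
      have := (hperm.map (fun q => q.1)).mem_iff.2 hv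
      simpa using this
    have hall : ∀ v ∈ rank, v = v0 := by
      rcases hcov with h | h
      · rw [← hlentmp] at h
        have hl1 : tmp.length = 1 := by
          rw [htmpm, List.length_map, ← hlensm]
          rfl
        omega
      · intro v hv
        exact hmemtr v (h v hv)
    obtain ⟨j, hjr, hjv, hja, hafter, hbefore⟩ := hC v0 (by simp)
    have hq0m : (v0, i0) ∈ m := hperm.mem_iff.1 (by simp)
    have hi0j : i0 = (j : Int) := hslot v0 i0 hq0m j hjr hjv hja hafter hbefore
    have e0 : (PySem.List.pyGet? (List.map (fun q => q.1) [((v0 : Int), i0)]) 0).getD 0 = v0 := rfl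
    have e1 : (PySem.List.pyGet? (List.map (fun q => q.1) [((v0 : Int), i0)]) 1).getD 0 = 0 := rfl
    have e2 : (PySem.List.pyGet? (List.map (fun q => q.1) [((v0 : Int), i0)]) 2).getD 0 = 0 := rfl
    rw [fold3_decomp, e0, e1, e2]
    rw [lastScan_none (fun p : Int × Int => (¬ p.2 = v0) ∧ p.2 = (0 : Int)) _ _
      (fun p hp hP => hP.1 (hall p.2 (snd_mem_of_mem_enumerate rank p hp)))]
    rw [lastScan_none (fun p : Int × Int => (¬ p.2 = v0) ∧ (¬ p.2 = (0 : Int)) ∧ p.2 = (0 : Int)) _ _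
      (fun p hp hP => hP.1 (hall p.2 (snd_mem_of_mem_enumerate rank p hp)))]
    rw [hscan v0 j 0 hjr hjv hafter]
    simp [hi0j]
  · -- exactly two attended pairs
    have hmemtr : ∀ v, v ∈ tmp → v = v0 ∨ v = v1 := by
      intro v hv
      rw [htmpm] at hv
      have := (hperm.map (fun q => q.1)).mem_iff.2 hv
      simpa using this
    have hall : ∀ v ∈ rank, v = v0 ∨ v = v1 := by
      rcases hcov with h | h
      · rw [← hlentmp] at h
        have hl2 : tmp.length = 2 := by
          rw [htmpm, List.length_map, ← hlensm]
          rfl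
        omega
      · intro v hv
        exact hmemtr v (h v hv)
    obtain ⟨j0, hj0r, hj0v, hj0a, hafter0, hbefore0⟩ := hC v0 (by simp)
    obtain ⟨j1, hj1r, hj1v, hj1a, hafter1, hbefore1⟩ := hC v1 (by simp)
    have hq0m : (v0, i0) ∈ m := hperm.mem_iff.1 (by simp)
    have hq1m : (v1, i1) ∈ m := hperm.mem_iff.1 (by simp)
    have hi0j : i0 = (j0 : Int) := hslot v0 i0 hq0m j0 hj0r hj0v hj0a hafter0 hbefore0
    have hi1j : i1 = (j1 : Int) := hslot v1 i1 hq1m j1 hj1r hj1v hj1a hafter1 hbefore1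
    have hne01 : i0 ≠ i1 := by
      have hnd' : ([i0, i1] : List Int).Nodup := by simpa using hndsm2
      exact (List.nodup_cons.1 hnd').1 ∘ (by simp [·])
    have h01 : v1 ≠ v0 := by
      intro h
      rw [h] at hq1m
      have := hslot v0 i1 hq1m j0 hj0r hj0v hj0a hafter0 hbefore0
      exact hne01 (hi0j.trans this.symm)
    have e0 : (PySem.List.pyGet? (List.map (fun q => q.1) [((v0 : Int), i0), (v1, i1)]) 0).getD 0
        = v0 := rfl
    have e1 : (PySem.List.pyGet? (List.map (fun q => q.1) [((v0 : Int), i0), (v1, i1)]) 1).getD 0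
        = v1 := rfl
    have e2 : (PySem.List.pyGet? (List.map (fun q => q.1) [((v0 : Int), i0), (v1, i1)]) 2).getD 0
        = 0 := rfl
    rw [fold3_decomp, e0, e1, e2]
    rw [lastScan_none (fun p : Int × Int =>
        (¬ p.2 = v0) ∧ (¬ p.2 = v1) ∧ p.2 = (0 : Int)) _ _
      (fun p hp hP =>
        (hall p.2 (snd_mem_of_mem_enumerate rank p hp)).elim hP.1 hP.2.1)]
    rw [scanB_simp _ _ _ h01]
    rw [hscan v0 j0 0 hj0r hj0v hafter0, hscan v1 j1 0 hj1r hj1v hafter1]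
    simp [hi0j, hi1j]
  · -- three or more attended pairs: the generic case
    obtain ⟨j0, hj0r, hj0v, hj0a, hafter0, hbefore0⟩ := hC v0 (by simp)
    obtain ⟨j1, hj1r, hj1v, hj1a, hafter1, hbefore1⟩ := hC v1 (by simp)
    obtain ⟨j2, hj2r, hj2v, hj2a, hafter2, hbefore2⟩ := hC v2 (by simp)
    have hq0m : (v0, i0) ∈ m := hperm.mem_iff.1 (by simp)
    have hq1m : (v1, i1) ∈ m := hperm.mem_iff.1 (by simp)
    have hq2m : (v2, i2) ∈ m := hperm.mem_iff.1 (by simp)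
    have hi0j : i0 = (j0 : Int) := hslot v0 i0 hq0m j0 hj0r hj0v hj0a hafter0 hbefore0
    have hi1j : i1 = (j1 : Int) := hslot v1 i1 hq1m j1 hj1r hj1v hj1a hafter1 hbefore1
    have hi2j : i2 = (j2 : Int) := hslot v2 i2 hq2m j2 hj2r hj2v hj2a hafter2 hbefore2
    have hnd' : (i0 :: i1 :: i2 :: rest.map (fun q => q.2)).Nodup := by
      simpa using hndsm2
    have hne01 : i0 ≠ i1 := fun h => (List.nodup_cons.1 hnd').1 (by simp [h])
    have hne02 : i0 ≠ i2 := fun h => (List.nodup_cons.1 hnd').1 (by simp [h])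
    have hne12 : i1 ≠ i2 := fun h =>
      (List.nodup_cons.1 (List.nodup_cons.1 hnd').2).1 (by simp [h])
    have h01 : v1 ≠ v0 := by
      intro h
      rw [h] at hq1m
      have := hslot v0 i1 hq1m j0 hj0r hj0v hj0a hafter0 hbefore0
      exact hne01 (hi0j.trans this.symm)
    have h02 : v2 ≠ v0 := by
      intro h
      rw [h] at hq2m
      have := hslot v0 i2 hq2m j0 hj0r hj0v hj0a hafter0 hbefore0
      exact hne02 (hi0j.trans this.symm)
    have h12 : v2 ≠ v1 := by
      intro h
      rw [h] at hq2m
      have := hslot v1 i2 hq2m j1 hj1r hj1v hj1a hafter1 hbefore1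
      exact hne12 (hi1j.trans this.symm)
    have e0 : (PySem.List.pyGet? (List.map (fun q => q.1)
        ((v0, i0) :: (v1, i1) :: (v2, i2) :: rest)) 0).getD 0 = v0 := by
      rw [PySem.List.pyGet?_zero]
      rfl
    have e1 : (PySem.List.pyGet? (List.map (fun q => q.1)
        ((v0, i0) :: (v1, i1) :: (v2, i2) :: rest)) 1).getD 0 = v1 := by
      rw [PySem.List.pyGet?_ofNat']
      rfl
    have e2 : (PySem.List.pyGet? (List.map (fun q => q.1)
        ((v0, i0) :: (v1, i1) :: (v2, i2) :: rest)) 2).getD 0 = v2 := by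
      rw [PySem.List.pyGet?_ofNat']
      rfl
    rw [fold3_decomp, e0, e1, e2, scanB_simp _ _ _ h01, scanC_simp _ _ _ _ h02 h12]
    rw [hscan v0 j0 0 hj0r hj0v hafter0, hscan v1 j1 0 hj1r hj1v hafter1,
      hscan v2 j2 0 hj2r hj2v hafter2]
    simp [hi0j, hi1j, hi2j]
    ring

-- ===== VERDICT (by name: the statement is the Claim_ definition above) =====
theorem solution_spec : Claim_equal_solution := by
  intro rank attendance _ hpre
  unfold Spec_solution
  exact main rank attendance hpre.2.1 hpre.2.2
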